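-- pv_equiv track=rewrite | github.com/CodelineAtyab/OrbitXO | examples/from_almuhannad/TextFlow/logic.py | string_to_number_list
-- ===== SOURCE A (Python) =====
-- from typing import List, Tuple
--
-- def _get_char_value(char: str) -> int:
--
--     if 'a' <= char <= 'z':
--         return ord(char) - ord('a') + 1
--     return 0
--
-- def _parse_count(s: str, index: int) -> Tuple[int, int]:
--
--     count = 0
--     while index < len(s) and s[index] == 'z':
--         count += 26
--         index += 1
--
--     if index < len(s):
--         count += _get_char_value(s[index])
--         index += 1
--     return count, index
--
-- def _process_segment(s: str, index: int) -> Tuple[int, int]: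
--
--     count, index = _parse_count(s, index)
--
--     sub_chars_end_index = index
--     items_to_collect = count
--
--     while items_to_collect > 0 and sub_chars_end_index < len(s):
--         if s[sub_chars_end_index] == 'z':
--
--             temp_index = sub_chars_end_index
--             while temp_index < len(s) and s[temp_index] == 'z':
--                 temp_index += 1
--             if temp_index < len(s):
--                 temp_index += 1
--             sub_chars_end_index = temp_index
--         else:
--             sub_chars_end_index += 1
--         items_to_collect -= 1
--
--     sub_chars = s[index:sub_chars_end_index]
--     current_sum = sum(_get_char_value(c) for c in sub_chars)
--     return current_sum, sub_chars_end_index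
--
-- def string_to_number_list(s: str) -> List[int]:
--
--     s = s.lower()
--     result = []
--     i = 0
--     while i < len(s):
--         if _get_char_value(s[i]) == 0:
--             result.append(0)
--             i += 1
--         else:
--             current_sum, i = _process_segment(s, i)
--             result.append(current_sum)
--     return result
-- ===== SOURCE B (Python) =====
-- from typing import List, Tuple
--
--
-- def _read_block(s: str, i: int) -> Tuple[int, int]:
--     """Read one token: a maximal run of 'z' (26 each) plus one following
--     character if any (its a-z value, else 0). Returns (block_value, next_index)."""
--     v = 0
--     while i < len(s) and s[i] == 'z':
--         v += 26
--         i += 1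
--     if i < len(s):
--         c = s[i]
--         if 'a' <= c <= 'z':
--             v += ord(c) - ord('a') + 1
--         i += 1
--     return v, i
--
--
-- def string_to_number_list(s: str) -> List[int]:
--     s = s.lower()
--     result = []
--     i = 0
--     while i < len(s):
--         c = s[i]
--         if not ('a' <= c <= 'z'):
--             result.append(0)
--             i += 1
--         else:
--             count, i = _read_block(s, i)
--             total = 0
--             while count > 0 and i < len(s):
--                 v, i = _read_block(s, i)
--                 total += v
--                 count -= 1
--             result.append(total)
--     return result
-- ===== Notes on version B (the rewrite author's own statement) =====
-- stated objective: simpler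
-- what changed: One reusable block reader replaces A's three separate loops (count parser, z-run rescanner, collector) and the segment sum is accumulated directly during the single collecting pass instead of recording an end index and re-summing a slice.
import Mathlib
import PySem

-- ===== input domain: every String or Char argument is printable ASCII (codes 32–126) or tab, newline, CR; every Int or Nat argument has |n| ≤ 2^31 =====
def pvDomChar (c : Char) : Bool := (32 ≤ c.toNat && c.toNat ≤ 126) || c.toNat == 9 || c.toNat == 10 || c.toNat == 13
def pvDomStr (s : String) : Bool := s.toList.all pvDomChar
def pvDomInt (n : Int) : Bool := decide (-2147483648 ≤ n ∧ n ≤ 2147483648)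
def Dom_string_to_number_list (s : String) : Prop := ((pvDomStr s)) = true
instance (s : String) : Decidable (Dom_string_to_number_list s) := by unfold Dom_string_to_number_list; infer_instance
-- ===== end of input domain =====

-- B replaces A's three separate scanning loops (count parser, z-run rescanner, collector)
-- by one reusable block reader and sums the segment directly in the single collecting pass
-- instead of recording an end index and re-summing a slice (objective: simpler).
-- Loops are ported with an explicit fuel argument that merely bounds iteration counts
-- (fuel is always sufficient: each while-loop step advances its index or decrements its counter).

-- ===== PORT A =====

-- _get_char_value
def pvGetCharValue (c : Char) : Int :=
  if 'a' ≤ c ∧ c ≤ 'z' then (c.toNat : Int) - 97 + 1 else 0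

-- the z-run loop of _parse_count (one step per consumed index; fuel l.length - i suffices)
def pvParseCountZ (l : List Char) (fuel : Nat) (i : Nat) (count : Int) : Int × Nat :=
  match fuel with
  | 0 => (count, i)
  | fuel + 1 =>
    if h : i < l.length then
      if l[i] = 'z' then pvParseCountZ l fuel (i + 1) (count + 26) else (count, i)
    else (count, i)

-- _parse_count
def pvParseCount (l : List Char) (i : Nat) : Int × Nat :=
  let p := pvParseCountZ l (l.length - i) i 0
  if h : p.2 < l.length then (p.1 + pvGetCharValue l[p.2], p.2 + 1) else p

-- the inner z-run rescan of _process_segment (one step per consumed index)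
def pvZEnd (l : List Char) (fuel : Nat) (t : Nat) : Nat :=
  match fuel with
  | 0 => t
  | fuel + 1 =>
    if h : t < l.length then
      if l[t] = 'z' then pvZEnd l fuel (t + 1) else t
    else t

-- the collection loop of _process_segment (one step per decrement of items_to_collect)
def pvCollect (l : List Char) (fuel : Nat) (e : Nat) (items : Int) : Nat :=
  match fuel with
  | 0 => e
  | fuel + 1 =>
    if h : 0 < items ∧ e < l.length then
      let e' := if l[e]'h.2 = 'z' then
          (let t := pvZEnd l (l.length - e) e; if t < l.length then t + 1 else t)
        else e + 1
      pvCollect l fuel e' (items - 1)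
    else e

-- _process_segment
def pvProcessSegment (l : List Char) (i : Nat) : Int × Nat :=
  let p := pvParseCount l i
  let e := pvCollect l p.1.toNat p.2 p.1
  (((PySem.List.slice l (some (p.2 : Int)) (some (e : Int))).map pvGetCharValue).sum, e)

-- string_to_number_list's while loop (each iteration advances i by at least one)
def pvMainLoop (l : List Char) (fuel : Nat) (i : Nat) : List Int :=
  match fuel with
  | 0 => []
  | fuel + 1 =>
    if h : i < l.length then
      if pvGetCharValue l[i] = 0 then 0 :: pvMainLoop l fuel (i + 1)
      else
        let p := pvProcessSegment l i
        p.1 :: pvMainLoop l fuel p.2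
    else []

def string_to_number_list (s : String) : List Int :=
  pvMainLoop (PySem.Str.lower s).toList (PySem.Str.lower s).toList.length 0

-- ===== PORT B =====

-- the z-run loop of _read_block (one step per consumed index; fuel l.length - i suffices)
def pvReadBlockZ (l : List Char) (fuel : Nat) (i : Nat) (v : Int) : Int × Nat :=
  match fuel with
  | 0 => (v, i)
  | fuel + 1 =>
    if h : i < l.length then
      if l[i] = 'z' then pvReadBlockZ l fuel (i + 1) (v + 26) else (v, i)
    else (v, i)

-- _read_block
def pvReadBlock (l : List Char) (i : Nat) : Int × Nat :=
  let p := pvReadBlockZ l (l.length - i) i 0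
  if h : p.2 < l.length then
    (if 'a' ≤ l[p.2] ∧ l[p.2] ≤ 'z' then p.1 + ((l[p.2].toNat : Int) - 97 + 1) else p.1,
     p.2 + 1)
  else p

-- the summing collection loop inside string_to_number_list (one step per decrement of count)
def pvSumBlocks (l : List Char) (fuel : Nat) (i : Nat) (count : Int) (total : Int) : Int × Nat :=
  match fuel with
  | 0 => (total, i)
  | fuel + 1 =>
    if 0 < count ∧ i < l.length then
      let p := pvReadBlock l i
      pvSumBlocks l fuel p.2 (count - 1) (total + p.1)
    else (total, i)

-- string_to_number_list's while loop (B; each iteration advances i by at least one)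
def pvAltLoop (l : List Char) (fuel : Nat) (i : Nat) : List Int :=
  match fuel with
  | 0 => []
  | fuel + 1 =>
    if h : i < l.length then
      if ¬ ('a' ≤ l[i] ∧ l[i] ≤ 'z') then 0 :: pvAltLoop l fuel (i + 1)
      else
        let p := pvReadBlock l i
        let q := pvSumBlocks l p.1.toNat p.2 p.1 0
        q.1 :: pvAltLoop l fuel q.2
    else []

def string_to_number_list_alt (s : String) : List Int :=
  pvAltLoop (PySem.Str.lower s).toList (PySem.Str.lower s).toList.length 0

-- ===== PRECONDITION & SPEC =====
def Spec_string_to_number_list (s : String) (out : List Int) : Prop := out = string_to_number_list_alt s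
instance (s : String) (out : List Int) : Decidable (Spec_string_to_number_list s out) := by unfold Spec_string_to_number_list; infer_instance

-- ===== CLAIM (what is proved, stated in full; the proofs are below) =====
def Claim_equal_string_to_number_list : Prop := ∀ (s : String), Dom_string_to_number_list s → Spec_string_to_number_list s (string_to_number_list s)

-- ===== LEMMAS AND PROOFS =====

-- sum of character values over the index interval [a, b) — the quantity both programs produce
def pvSegSum (l : List Char) (a b : Nat) : Int :=
  (((l.drop a).take (b - a)).map pvGetCharValue).sum

lemma pvSegSum_self (l : List Char) (a : Nat) : pvSegSum l a a = 0 := by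
  simp [pvSegSum]

lemma pvSegSum_cons (l : List Char) (a b : Nat) (ha : a < l.length) (hab : a < b) :
    pvSegSum l a b = pvGetCharValue l[a] + pvSegSum l (a + 1) b := by
  unfold pvSegSum
  rw [List.drop_eq_getElem_cons ha, show b - a = (b - (a + 1)) + 1 by omega,
    List.take_succ_cons]
  simp

lemma pvSegSum_split (l : List Char) (a b c : Nat) (hab : a ≤ b) (hbc : b ≤ c) :
    pvSegSum l a c = pvSegSum l a b + pvSegSum l b c := by
  unfold pvSegSum
  rw [show c - a = (b - a) + (c - b) by omega, List.take_add, List.drop_drop,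
    show a + (b - a) = b by omega]
  simp

-- the two z-run loops are the same loop
lemma pvZ_eq (l : List Char) (f i : Nat) (v : Int) :
    pvReadBlockZ l f i v = pvParseCountZ l f i v := by
  induction f generalizing i v with
  | zero => rfl
  | succ f ih => simp only [pvReadBlockZ, pvParseCountZ]; split <;> [split <;> simp [ih]; rfl]

-- B's _read_block is A's _parse_count
lemma pvReadBlock_eq_parseCount (l : List Char) (i : Nat) :
    pvReadBlock l i = pvParseCount l i := by
  simp only [pvReadBlock, pvParseCount, pvZ_eq]
  split
  · simp only [pvGetCharValue]
    split <;> simp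
  · rfl

lemma pvReadBlockZ_le (l : List Char) (f i : Nat) (v : Int) :
    i ≤ (pvReadBlockZ l f i v).2 := by
  induction f generalizing i v with
  | zero => simp [pvReadBlockZ]
  | succ f ih =>
    simp only [pvReadBlockZ]
    split
    · split
      · exact le_trans (by omega) (ih (i + 1) (v + 26))
      · simp
    · simp

lemma pvReadBlockZ_snd (l : List Char) (f i : Nat) (v : Int) :
    (pvReadBlockZ l f i v).2 = pvZEnd l f i := by
  induction f generalizing i v with
  | zero => rfl
  | succ f ih => simp only [pvReadBlockZ, pvZEnd]; split <;> [split <;> simp [ih]; rfl]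

lemma pvReadBlockZ_fst (l : List Char) (f i : Nat) (v : Int) :
    (pvReadBlockZ l f i v).1 = v + pvSegSum l i (pvReadBlockZ l f i v).2 := by
  induction f generalizing i v with
  | zero => simp [pvReadBlockZ, pvSegSum_self]
  | succ f ih =>
    simp only [pvReadBlockZ]
    split
    · rename_i h
      split
      · rename_i hz
        have hle := pvReadBlockZ_le l f (i + 1) (v + 26)
        rw [ih (i + 1) (v + 26), pvSegSum_cons l i _ h (by omega), hz]
        have hz26 : pvGetCharValue 'z' = 26 := by decide
        rw [hz26]; ring
      · simp [pvSegSum_self]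
    · simp [pvSegSum_self]

-- one _read_block call advances exactly as one step of A's collection loop
lemma pvReadBlock_snd (l : List Char) (e : Nat) (h : e < l.length) :
    (pvReadBlock l e).2 =
      if l[e] = 'z' then
        (if pvZEnd l (l.length - e) e < l.length then pvZEnd l (l.length - e) e + 1
         else pvZEnd l (l.length - e) e)
      else e + 1 := by
  simp only [pvReadBlock]
  by_cases hz : l[e] = 'z'
  · rw [pvReadBlockZ_snd]
    simp only [hz, if_true]
    split <;> simp_all [pvReadBlockZ_snd]
  · have hp : pvReadBlockZ l (l.length - e) e 0 = (0, e) := by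
      have hf : l.length - e = (l.length - (e + 1)) + 1 := by omega
      rw [hf, pvReadBlockZ]
      simp [h, hz]
    rw [hp]
    simp [h, hz]

-- one _read_block call's value is the character-value sum over the indices it consumed
lemma pvReadBlock_fst (l : List Char) (e : Nat) :
    (pvReadBlock l e).1 = pvSegSum l e ((pvReadBlock l e).2) := by
  simp only [pvReadBlock]
  have hv := pvReadBlockZ_fst l (l.length - e) e 0
  have hle := pvReadBlockZ_le l (l.length - e) e 0
  by_cases hp : (pvReadBlockZ l (l.length - e) e 0).2 < l.length
  · rw [dif_pos hp]
    rw [pvSegSum_split l e (pvReadBlockZ l (l.length - e) e 0).2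
        ((pvReadBlockZ l (l.length - e) e 0).2 + 1) hle (by omega),
      pvSegSum_cons l _ _ hp (by omega), pvSegSum_self]
    simp only [pvGetCharValue]
    split <;> (rw [hv]; ring)
  · rw [dif_neg hp]
    rw [hv]; ring

lemma pvCollect_le (l : List Char) (f e : Nat) (items : Int) : e ≤ pvCollect l f e items := by
  induction f generalizing e items with
  | zero => simp [pvCollect]
  | succ f ih =>
    simp only [pvCollect]
    split
    · rename_i h
      have hlo : ∀ g t, t ≤ pvZEnd l g t := by
        intro g
        induction g with
        | zero => intro t; simp [pvZEnd]
        | succ g ihg =>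
          intro t
          simp only [pvZEnd]
          split
          · split
            · have := ihg (t + 1); omega
            · omega
          · omega
      refine le_trans ?_ (ih _ (items - 1))
      split
      · have := hlo (l.length - e) e; split <;> omega
      · omega
    · omega

-- B's summing collection loop computes A's end index and the value A re-sums from the slice
lemma pvSumBlocks_eq_collect (l : List Char) (f i : Nat) (count total : Int) :
    (pvSumBlocks l f i count total).2 = pvCollect l f i count ∧
    (pvSumBlocks l f i count total).1 = total + pvSegSum l i (pvCollect l f i count) := by
  induction f generalizing i count total with
  | zero => simp [pvSumBlocks, pvCollect, pvSegSum_self]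
  | succ f ih =>
    simp only [pvSumBlocks, pvCollect]
    split
    · rename_i h
      have hsnd := pvReadBlock_snd l i h.2
      have ihs := ih (pvReadBlock l i).2 (count - 1) (total + (pvReadBlock l i).1)
      rw [← hsnd]
      refine ⟨ihs.1, ?_⟩
      rw [ihs.2]
      have h1 := pvReadBlockZ_le l (l.length - i) i 0
      have h2 : i ≤ (pvReadBlock l i).2 := by
        simp only [pvReadBlock]
        split <;> omega
      have h3 := pvCollect_le l f (pvReadBlock l i).2 (count - 1)
      rw [pvSegSum_split l i (pvReadBlock l i).2 _ h2 h3, pvReadBlock_fst]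
      ring
    · simp [pvSegSum_self]

-- B's block reader plus summing loop compute exactly A's _process_segment pair
lemma pvProcessSegment_eq (l : List Char) (i : Nat) :
    (pvSumBlocks l (pvReadBlock l i).1.toNat (pvReadBlock l i).2 (pvReadBlock l i).1 0).1
      = (pvProcessSegment l i).1 ∧
    (pvSumBlocks l (pvReadBlock l i).1.toNat (pvReadBlock l i).2 (pvReadBlock l i).1 0).2
      = (pvProcessSegment l i).2 := by
  have hq := pvSumBlocks_eq_collect l (pvReadBlock l i).1.toNat (pvReadBlock l i).2
    (pvReadBlock l i).1 0
  rw [pvReadBlock_eq_parseCount] at hq ⊢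
  simp only [pvProcessSegment]
  refine ⟨?_, hq.1⟩
  rw [hq.2, zero_add, PySem.List.slice_natCast]
  simp [pvSegSum]

-- the branch tests agree: value 0 exactly off 'a'..'z'
lemma pvGetCharValue_eq_zero_iff (c : Char) :
    pvGetCharValue c = 0 ↔ ¬ ('a' ≤ c ∧ c ≤ 'z') := by
  unfold pvGetCharValue
  split
  · rename_i hc
    have h1 : 97 ≤ c.toNat := hc.1
    simp only [iff_false_intro (not_not_intro hc), iff_false]
    omega
  · simp_all

theorem pv_main_eq (l : List Char) (f i : Nat) : pvMainLoop l f i = pvAltLoop l f i := by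
  induction f generalizing i with
  | zero => rfl
  | succ f ih =>
    simp only [pvMainLoop, pvAltLoop]
    split
    · rename_i h
      by_cases h0 : pvGetCharValue l[i] = 0
      · rw [if_pos h0, if_pos ((pvGetCharValue_eq_zero_iff l[i]).mp h0), ih]
      · have hb : ('a' ≤ l[i] ∧ l[i] ≤ 'z') := by
          by_contra hc
          exact h0 ((pvGetCharValue_eq_zero_iff l[i]).mpr hc)
        rw [if_neg h0, if_neg (not_not_intro hb)]
        have hs := pvProcessSegment_eq l i
        rw [hs.1, hs.2, ih]
    · rfl

-- ===== VERDICT (by name: the statement is the Claim_ definition above) =====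
theorem string_to_number_list_spec : Claim_equal_string_to_number_list := by
  intro s _
  unfold Spec_string_to_number_list string_to_number_list string_to_number_list_alt
  exact pv_main_eq _ _ 0
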